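-- pv_equiv track=rewrite | github.com/elpresidente2025/cyberbrain | functions/python/services/posts/corrector.py | summarize_violations
-- ===== SOURCE A (Python) =====
-- from typing import Any, Dict, List, Optional, Sequence
--
-- def summarize_violations(violations: Sequence[Dict[str, Any]]) -> str:
--     if not violations:
--         return "위반 사항 없음"
--
--     hard = len([v for v in violations if (v or {}).get("severity") == "HARD"])
--     soft = len([v for v in violations if (v or {}).get("severity") == "SOFT"])
--     political = len([v for v in violations if (v or {}).get("severity") == "POLITICAL"])
--
--     parts: List[str] = []
--     if hard:
--         parts.append(f"치명적 {hard}건")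
--     if soft:
--         parts.append(f"개선필요 {soft}건")
--     if political:
--         parts.append(f"권고 {political}건")
--
--     return ", ".join(parts)
-- ===== SOURCE B (Python) =====
-- from typing import Any, Dict, List, Optional, Sequence
--
--
-- def summarize_violations(violations: Sequence[Dict[str, Any]]) -> str:
--     if not violations:
--         return "위반 사항 없음"
--
--     counts: Dict[Optional[str], int] = {}
--     for v in violations:
--         s = (v or {}).get("severity")
--         counts[s] = counts.get(s, 0) + 1
--
--     parts: List[str] = []
--     for sev, label in (("HARD", "치명적"), ("SOFT", "개선필요"), ("POLITICAL", "권고")):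
--         n = counts.get(sev, 0)
--         if n:
--             parts.append(f"{label} {n}건")
--
--     return ", ".join(parts)
-- ===== Notes on version B (the rewrite author's own statement) =====
-- stated objective: simpler
-- what changed: Replaces three separate list-comprehension scans (one per severity) with a single pass that builds a severity->count dict, then emits the three labelled parts from that dict in the fixed order.
import Mathlib
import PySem

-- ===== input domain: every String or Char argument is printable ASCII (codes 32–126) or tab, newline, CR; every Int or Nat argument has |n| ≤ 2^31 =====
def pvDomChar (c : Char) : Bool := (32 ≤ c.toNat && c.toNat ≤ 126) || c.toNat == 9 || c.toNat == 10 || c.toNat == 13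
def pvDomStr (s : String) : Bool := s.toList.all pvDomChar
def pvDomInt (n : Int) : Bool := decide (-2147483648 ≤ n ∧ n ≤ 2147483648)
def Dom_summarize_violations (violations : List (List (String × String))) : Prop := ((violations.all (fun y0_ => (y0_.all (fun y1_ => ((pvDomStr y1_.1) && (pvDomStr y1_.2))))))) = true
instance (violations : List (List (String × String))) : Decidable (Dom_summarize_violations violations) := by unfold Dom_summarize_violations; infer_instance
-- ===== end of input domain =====

-- B replaces A's three per-severity list scans with a single counting pass over a
-- severity→count dict, then emits the labelled parts from the dict (objective: simpler).

-- ===== PORT A =====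
def summarize_violations (violations : List (List (String × String))) : String :=
  if violations = [] then "위반 사항 없음"
  else
    let hard : Int := (violations.filter (fun v => List.lookup "severity" v == some "HARD")).length
    let soft : Int := (violations.filter (fun v => List.lookup "severity" v == some "SOFT")).length
    let political : Int := (violations.filter (fun v => List.lookup "severity" v == some "POLITICAL")).length
    let parts : List String := []
    let parts := if hard ≠ 0 then parts ++ ["치명적 " ++ PySem.Int.toStr hard ++ "건"] else parts
    let parts := if soft ≠ 0 then parts ++ ["개선필요 " ++ PySem.Int.toStr soft ++ "건"] else parts
    let parts := if political ≠ 0 then parts ++ ["권고 " ++ PySem.Int.toStr political ++ "건"] else parts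
    PySem.Str.join ", " parts

-- ===== PORT B =====
def summarize_violations_alt (violations : List (List (String × String))) : String :=
  if violations = [] then "위반 사항 없음"
  else
    let counts : PySem.Dict (Option String) Int :=
      violations.foldl (fun d v => d.modify (List.lookup "severity" v) 0 (· + 1)) PySem.Dict.empty
    let parts : List String :=
      [("HARD", "치명적"), ("SOFT", "개선필요"), ("POLITICAL", "권고")].foldl
        (fun parts p =>
          let n : Int := counts.getD (some p.1) 0
          if n ≠ 0 then parts ++ [p.2 ++ " " ++ PySem.Int.toStr n ++ "건"] else parts) []
    PySem.Str.join ", " parts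

-- ===== PRECONDITION & SPEC =====
def Spec_summarize_violations (violations : List (List (String × String))) (out : String) : Prop := out = summarize_violations_alt violations
instance (violations : List (List (String × String))) (out : String) : Decidable (Spec_summarize_violations violations out) := by unfold Spec_summarize_violations; infer_instance

-- ===== CLAIM (what is proved, stated in full; the proofs are below) =====
def Claim_equal_summarize_violations : Prop := ∀ (violations : List (List (String × String))), Dom_summarize_violations violations → Spec_summarize_violations violations (summarize_violations violations)

-- ===== LEMMAS AND PROOFS =====

-- B's one-pass counter at key `some k` is A's filtered-scan length for severity k (loop invariant).
theorem counts_getD_aux (k : String) (l : List (List (String × String)))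
    (d : PySem.Dict (Option String) Int) :
    ((l.foldl (fun d v => d.modify (List.lookup "severity" v) 0 (· + 1)) d).getD (some k) 0)
      = d.getD (some k) 0 + ((l.filter (fun v => List.lookup "severity" v == some k)).length : Int) := by
  induction l generalizing d with
  | nil => simp
  | cons v t ih =>
    simp only [List.foldl_cons, List.filter_cons]
    rw [ih, PySem.Dict.getD_modify]
    by_cases h : List.lookup "severity" v = some k
    · simp [h]; ring
    · have h' : ¬ (some k = List.lookup "severity" v) := fun hh => h hh.symm
      simp [h, h']

theorem counts_getD_eq (violations : List (List (String × String))) (k : String) :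
    ((violations.foldl (fun d v => d.modify (List.lookup "severity" v) 0 (· + 1))
        PySem.Dict.empty).getD (some k) 0)
      = ((violations.filter (fun v => List.lookup "severity" v == some k)).length : Int) := by
  rw [counts_getD_aux]
  simp [PySem.Dict.getD_empty]

-- ===== VERDICT (by name: the statement is the Claim_ definition above) =====
theorem summarize_violations_spec : Claim_equal_summarize_violations := by
  intro violations _
  unfold Spec_summarize_violations summarize_violations summarize_violations_alt
  by_cases h : violations = []
  · simp [h]
  · simp only [h, if_false, List.foldl]
    rw [counts_getD_eq, counts_getD_eq, counts_getD_eq]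
    simp only [show ("치명적" : String) ++ " " = "치명적 " from rfl,
               show ("개선필요" : String) ++ " " = "개선필요 " from rfl,
               show ("권고" : String) ++ " " = "권고 " from rfl]
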